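-- pv_equiv track=rewrite | github.com/xueyouluo/ccks2021-track2-code | code/utils.py | convert_to_bio
-- ===== SOURCE A (Python) =====
-- def convert_to_bio(tags):
--     for i in range(len(tags)):
--         t = tags[i]
--         if t[0]=='B':
--             j = i+1
--             while j < len(tags) and tags[j][0] not in ['E','S']:
--                 j += 1
--             if j >= len(tags):
--                 tags[i] = 'O'
--             elif tags[j][0] == 'S':
--                 # error
--                 tags[i:j] = ['O'] * (j-i)
--             elif tags[j][0] == 'E':
--                 tags[i+1:j+1] = ['I-span']*(j-i)
--     tags = ['B'+t[1:] if t[0]=='S' else t for t in tags]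
--     return tags
-- ===== SOURCE B (Python) =====
-- def convert_to_bio(tags):
--     # One backward scan precomputing the next E/S position, then one forward
--     # pass building a fresh output list (does not mutate the input, unlike the
--     # original, which edits `tags` in place).
--     n = len(tags)
--     nxt = [n] * (n + 1)
--     for k in range(n - 1, -1, -1):
--         nxt[k] = k if tags[k][0] in ('E', 'S') else nxt[k + 1]
--     out = []
--     i = 0
--     while i < n:
--         t = tags[i]
--         c = t[0]
--         if c == 'B':
--             j = nxt[i + 1]
--             if j >= n:
--                 out.append('O')
--                 i += 1
--             elif tags[j][0] == 'S':
--                 out.extend(['O'] * (j - i))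
--                 i = j
--             else:  # tags[j][0] == 'E'
--                 out.append(t)
--                 out.extend(['I-span'] * (j - i))
--                 i = j + 1
--         elif c == 'S':
--             out.append('B' + t[1:])
--             i += 1
--         else:
--             out.append(t)
--             i += 1
--     return out
-- ===== Notes on version B (the rewrite author's own statement) =====
-- stated objective: alternative
-- what changed: A repeatedly rescans forward from every 'B' tag to find the next 'E'/'S' closer and edits the list in place; B precomputes the next-closer index for every position in one backward pass and then builds the output in a single forward pass, never mutating the input (A mutates its argument in place; the equivalence is about the return value).
import Mathlib
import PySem

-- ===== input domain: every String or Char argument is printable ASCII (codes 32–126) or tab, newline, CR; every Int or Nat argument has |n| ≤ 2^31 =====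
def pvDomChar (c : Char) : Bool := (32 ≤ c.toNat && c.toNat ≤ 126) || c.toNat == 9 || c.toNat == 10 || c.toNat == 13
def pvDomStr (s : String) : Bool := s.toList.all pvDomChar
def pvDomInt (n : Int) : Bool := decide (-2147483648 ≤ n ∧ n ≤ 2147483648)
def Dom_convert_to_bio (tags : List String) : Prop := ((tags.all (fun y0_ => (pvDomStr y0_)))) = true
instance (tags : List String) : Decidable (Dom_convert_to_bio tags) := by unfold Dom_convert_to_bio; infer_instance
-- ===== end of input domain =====

-- B replaces A's repeated forward rescans + in-place edits by one backward next-E/S precomputation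
-- and a single forward pass building a fresh output (alternative algorithm, not measured faster);
-- A mutates its argument in place, B does not — the equivalence proved here is about the return value only.


-- ===== PORT A =====
-- `while j < len(tags) and tags[j][0] not in ['E','S']: j += 1`
-- (tags[j][0] is PySem.Str.pyGet? _ 0; comparing the 1-char string tags[j][0] with 'E'/'S' is exactly
-- comparing the first char; `tags.getD j ""` = tags[j], exact since j < tags.length here)
def convertToBio_find (tags : List String) (j : Nat) : Nat :=
  if h : j < tags.length then
    if ¬ (PySem.Str.pyGet? (tags.getD j "") 0 = some 'E' ∨ PySem.Str.pyGet? (tags.getD j "") 0 = some 'S') then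
      convertToBio_find tags (j + 1)
    else j
  else j
  termination_by tags.length - j

-- one iteration of A's `for i in range(len(tags))` body; the list length is preserved by every edit,
-- so i < tags.length whenever this runs and `tags.getD i ""` = tags[i];
-- slice assignment tags[a:b] = new (0 ≤ a ≤ b ≤ len) is take a ++ new ++ drop b
def convertToBio_step (tags : List String) (i : Nat) : List String :=
  let t := tags.getD i ""
  if PySem.Str.pyGet? t 0 = some 'B' then
    let j := convertToBio_find tags (i + 1)
    if tags.length ≤ j then
      tags.set i "O"
    else if PySem.Str.pyGet? (tags.getD j "") 0 = some 'S' then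
      tags.take i ++ List.replicate (j - i) "O" ++ tags.drop j
    else if PySem.Str.pyGet? (tags.getD j "") 0 = some 'E' then
      tags.take (i + 1) ++ List.replicate (j - i) "I-span" ++ tags.drop (j + 1)
    else tags
  else tags

-- 'B' + t[1:] is exactly cons of 'B' onto the chars of t after the first
def convert_to_bio (tags : List String) : List String :=
  let tags2 := (List.range tags.length).foldl convertToBio_step tags
  tags2.map (fun t => if PySem.Str.pyGet? t 0 = some 'S' then String.ofList ('B' :: t.toList.drop 1) else t)

-- ===== PORT B =====
-- backward loop `nxt[k] = k if tags[k][0] in ('E','S') else nxt[k+1]` building the array nxt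
-- (k is the absolute index of the head of the remaining suffix; the seed list is [n])
def convertToBioAlt_nxt (n : Nat) : Nat → List String → List Nat
  | _, [] => [n]
  | k, t :: rest =>
    let acc := convertToBioAlt_nxt n (k + 1) rest
    (if PySem.Str.pyGet? t 0 = some 'E' ∨ PySem.Str.pyGet? t 0 = some 'S' then k else acc.headD n) :: acc

-- the `while i < n` loop; fuel only makes it total in Lean (i strictly increases each step,
-- so fuel = n never runs out)
def convertToBioAlt_loop (tags : List String) (nxt : List Nat) (n : Nat) :
    Nat → Nat → List String → List String
  | 0, _, out => out
  | fuel + 1, i, out =>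
    if i < n then
      let t := tags.getD i ""
      let c := PySem.Str.pyGet? t 0
      if c = some 'B' then
        let j := nxt.getD (i + 1) n
        if n ≤ j then
          convertToBioAlt_loop tags nxt n fuel (i + 1) (out ++ ["O"])
        else if PySem.Str.pyGet? (tags.getD j "") 0 = some 'S' then
          convertToBioAlt_loop tags nxt n fuel j (out ++ List.replicate (j - i) "O")
        else
          convertToBioAlt_loop tags nxt n fuel (j + 1) (out ++ [t] ++ List.replicate (j - i) "I-span")
      else if c = some 'S' then
        convertToBioAlt_loop tags nxt n fuel (i + 1) (out ++ [String.ofList ('B' :: t.toList.drop 1)])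
      else
        convertToBioAlt_loop tags nxt n fuel (i + 1) (out ++ [t])
    else out

def convert_to_bio_alt (tags : List String) : List String :=
  let n := tags.length
  let nxt := convertToBioAlt_nxt n 0 tags
  convertToBioAlt_loop tags nxt n n 0 []

-- ===== PRECONDITION & SPEC =====
-- Pre_ excludes exactly the inputs on which Python A raises: an empty-string tag makes t[0]
-- raise IndexError (B raises there too).
def Pre_convert_to_bio (tags : List String) : Prop := ∀ t ∈ tags, t ≠ ""
instance (tags : List String) : Decidable (Pre_convert_to_bio tags) := by unfold Pre_convert_to_bio; infer_instance
def pvWitness_convert_to_bio : List String := ["B-a", "I-a", "E-a", "S-b", "O"]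

def Spec_convert_to_bio (tags : List String) (out : List String) : Prop := out = convert_to_bio_alt tags
instance (tags : List String) (out : List String) : Decidable (Spec_convert_to_bio tags out) := by unfold Spec_convert_to_bio; infer_instance

-- ===== CLAIM (what is proved, stated in full; the proofs are below) =====
def Claim_equal_convert_to_bio : Prop := ∀ (tags : List String), Dom_convert_to_bio tags → Pre_convert_to_bio tags → Spec_convert_to_bio tags (convert_to_bio tags)

-- ===== LEMMAS AND PROOFS =====

-- first character, and "first char is E or S" (the closer test both programs use)
def pvFc (t : String) : Option Char := PySem.Str.pyGet? t 0
def pvEsB (t : String) : Bool := decide (pvFc t = some 'E' ∨ pvFc t = some 'S')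

-- split a list at its first E/S element: (prefix of non-closers, rest)
def pvSplitES : List String → List String × Option (String × List String)
  | [] => ([], none)
  | x :: xs =>
    if pvEsB x then ([], some (x, xs))
    else
      let r := pvSplitES xs
      (x :: r.1, r.2)

theorem pvSplitES_eq (l : List String) :
    l = (pvSplitES l).1 ++ (match (pvSplitES l).2 with | none => [] | some (s, post) => s :: post) := by
  induction l with
  | nil => rfl
  | cons x xs ih =>
    by_cases hx : pvEsB x
    · simp [pvSplitES, hx]
    · simpa [pvSplitES, hx] using ih

theorem pvSplitES_pre (l : List String) : ∀ x ∈ (pvSplitES l).1, pvEsB x = false := by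
  induction l with
  | nil => simp [pvSplitES]
  | cons x xs ih =>
    by_cases hx : pvEsB x
    · simp [pvSplitES, hx]
    · intro y hy
      simp only [pvSplitES, hx, Bool.false_eq_true, if_false, List.mem_cons] at hy
      rcases hy with rfl | hy
      · simpa using hx
      · exact ih y hy

theorem pvSplitES_some {l : List String} {s : String} {post : List String}
    (h : (pvSplitES l).2 = some (s, post)) : pvEsB s = true := by
  induction l with
  | nil => simp [pvSplitES] at h
  | cons x xs ih =>
    by_cases hx : pvEsB x
    · simp [pvSplitES, hx] at h
      exact h.1 ▸ hx
    · simp only [pvSplitES, hx, Bool.false_eq_true, if_false] at h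
      exact ih h

theorem pvSplitES_len {l : List String} {pre : List String} {s : String} {post : List String}
    (h : pvSplitES l = (pre, some (s, post))) :
    pre.length + post.length + 1 = l.length := by
  have he := pvSplitES_eq l
  rw [h] at he
  simp only at he
  rw [he]
  simp
  omega

-- the shared specification: process the tag list from the left, splitting at the next closer
def pvNormLoop : List String → List String
  | [] => []
  | t :: rest =>
    if pvFc t = some 'B' then
      match h : pvSplitES rest with
      | (_, none) => "O" :: pvNormLoop rest
      | (pre, some (s, post)) =>
        if pvFc s = some 'S' then
          List.replicate (pre.length + 1) "O" ++ s :: pvNormLoop post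
        else
          t :: List.replicate (pre.length + 1) "I-span" ++ pvNormLoop post
    else t :: pvNormLoop rest
  termination_by l => l.length
  decreasing_by
  all_goals first
    | (have := pvSplitES_len h; simp at this ⊢; omega)
    | (simp; omega)
    | simp

def pvSmap (t : String) : String :=
  if PySem.Str.pyGet? t 0 = some 'S' then String.ofList ('B' :: t.toList.drop 1) else t

-- equation lemmas for pvNormLoop
theorem pvNormLoop_nil : pvNormLoop [] = [] := by rw [pvNormLoop]

theorem pvNormLoop_cons_notB {t : String} {rest : List String} (hB : ¬ pvFc t = some 'B') :
    pvNormLoop (t :: rest) = t :: pvNormLoop rest := by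
  rw [pvNormLoop, if_neg hB]

theorem pvNormLoop_cons_none {t : String} {rest pre : List String}
    (hB : pvFc t = some 'B') (h : pvSplitES rest = (pre, none)) :
    pvNormLoop (t :: rest) = "O" :: pvNormLoop rest := by
  rw [pvNormLoop, if_pos hB]
  split
  · rfl
  · rename_i pre' s post heq
    rw [h] at heq
    simp at heq

theorem pvNormLoop_cons_S {t : String} {rest pre : List String} {s : String} {post : List String}
    (hB : pvFc t = some 'B') (h : pvSplitES rest = (pre, some (s, post)))
    (hs : pvFc s = some 'S') :
    pvNormLoop (t :: rest) = List.replicate (pre.length + 1) "O" ++ s :: pvNormLoop post := by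
  rw [pvNormLoop, if_pos hB]
  split
  · rename_i pre' heq
    rw [h] at heq
    simp at heq
  · rename_i pre' s' post' heq
    rw [h] at heq
    obtain ⟨rfl, rfl, rfl⟩ := by simpa using heq
    rw [if_pos hs]

theorem pvNormLoop_cons_E {t : String} {rest pre : List String} {s : String} {post : List String}
    (hB : pvFc t = some 'B') (h : pvSplitES rest = (pre, some (s, post)))
    (hs : ¬ pvFc s = some 'S') :
    pvNormLoop (t :: rest) = t :: List.replicate (pre.length + 1) "I-span" ++ pvNormLoop post := by
  rw [pvNormLoop, if_pos hB]
  split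
  · rename_i pre' heq
    rw [h] at heq
    simp at heq
  · rename_i pre' s' post' heq
    rw [h] at heq
    obtain ⟨rfl, rfl, rfl⟩ := by simpa using heq
    rw [if_neg hs]

theorem pvNormLoop_replicate {c : String} (hc : ¬ pvFc c = some 'B') (p : Nat) (l : List String) :
    pvNormLoop (List.replicate p c ++ l) = List.replicate p c ++ pvNormLoop l := by
  induction p with
  | zero => simp
  | succ p ih => simp [List.replicate_succ, pvNormLoop_cons_notB hc, ih]

theorem pvGetD_of_drop {l : List String} {j : Nat} {p : String} {ps : List String}
    (hd : l.drop j = p :: ps) : l.getD j "" = p := by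
  have h0 : l[j]? = some p := by
    rw [← List.head?_drop, hd]
    rfl
  simp [List.getD, h0]

theorem pvEsB_true {s : String}
    (hs : pvEsB s = true) : pvFc s = some 'E' ∨ pvFc s = some 'S' := by
  unfold pvEsB at hs
  exact of_decide_eq_true hs

theorem pvEsB_false {s : String}
    (hs : pvEsB s = false) : ¬ (pvFc s = some 'E' ∨ pvFc s = some 'S') := by
  unfold pvEsB at hs
  exact of_decide_eq_false hs

theorem pvFc_ne_of_eq {s : String} {a b : Char} (h : PySem.Str.pyGet? s 0 = some a)
    (hab : a ≠ b) : ¬ pvFc s = some b := by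
  rw [pvFc, h]
  simp [hab]

theorem pvFc_notB_O : ¬ pvFc "O" = some 'B' := by decide

theorem pvFc_notB_I : ¬ pvFc "I-span" = some 'B' := by decide

theorem pvDrop_succ_of_drop {l : List String} {j : Nat} {p : String} {ps : List String}
    (hd : l.drop j = p :: ps) : l.drop (j + 1) = ps := by
  rw [← List.tail_drop, hd]
  rfl

-- characterisation of A's inner while loop
theorem pvFind_of_drop_none (l : List String) :
    ∀ (j : Nat) (pre : List String), l.drop j = pre → j ≤ l.length →
      (∀ x ∈ pre, pvEsB x = false) → convertToBio_find l j = l.length := by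
  intro j pre
  induction pre generalizing j with
  | nil =>
    intro hd hj _
    rw [convertToBio_find]
    have hle : l.length ≤ j := by
      by_contra hlt
      simp only [not_lt] at hlt
      have : l.drop j ≠ [] := by
        intro hh
        have := List.drop_eq_nil_iff.mp hh
        omega
      exact this hd
    rw [dif_neg (by omega)]
    omega
  | cons p ps ih =>
    intro hd hj hpre
    have hjlt : j < l.length := by
      by_contra hlt
      simp only [not_lt] at hlt
      rw [List.drop_eq_nil_of_le hlt] at hd
      exact (List.cons_ne_nil p ps) hd.symm
    rw [convertToBio_find, dif_pos hjlt]
    have hget : l.getD j "" = p := pvGetD_of_drop hd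
    have hp := pvEsB_false (hpre p (by simp))
    rw [if_pos (by rw [hget]; exact hp)]
    apply ih (j + 1) ?_ (by omega) (fun x hx => hpre x (by simp [hx]))
    exact pvDrop_succ_of_drop hd

theorem pvFind_of_drop_some (l : List String) :
    ∀ (j : Nat) (pre : List String) (s : String) (post : List String),
      l.drop j = pre ++ s :: post → (∀ x ∈ pre, pvEsB x = false) → pvEsB s = true →
      convertToBio_find l j = j + pre.length := by
  intro j pre
  induction pre generalizing j with
  | nil =>
    intro s post hd _ hs
    have hjlt : j < l.length := by
      by_contra hlt
      simp only [not_lt] at hlt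
      rw [List.drop_eq_nil_of_le hlt] at hd
      exact (List.cons_ne_nil s post) hd.symm
    rw [convertToBio_find, dif_pos hjlt]
    have hget : l.getD j "" = s := pvGetD_of_drop hd
    rw [if_neg (by rw [hget]; exact not_not_intro (pvEsB_true hs))]
    simp
  | cons p ps ih =>
    intro s post hd hpre hs
    have hjlt : j < l.length := by
      by_contra hlt
      simp only [not_lt] at hlt
      rw [List.drop_eq_nil_of_le hlt] at hd
      exact (List.cons_ne_nil p (ps ++ s :: post)) hd.symm
    rw [convertToBio_find, dif_pos hjlt]
    have hget : l.getD j "" = p := pvGetD_of_drop hd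
    have hp := pvEsB_false (hpre p (by simp))
    rw [if_pos (by rw [hget]; exact hp)]
    have hrec := ih (j + 1) s post ?_ (fun x hx => hpre x (by simp [hx])) hs
    · rw [hrec]; simp; omega
    · exact pvDrop_succ_of_drop hd

-- the main A-side lemma: A's foldl over range(len) only depends on the suffix not yet visited
theorem pvLoopA : ∀ (N : Nat) (todo done : List String), todo.length ≤ N →
    List.foldl convertToBio_step (done ++ todo) (List.range' done.length todo.length 1) =
      done ++ pvNormLoop todo := by
  intro N
  induction N with
  | zero =>
    intro todo done h
    have : todo = [] := List.eq_nil_of_length_eq_zero (by omega)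
    subst this
    simp [pvNormLoop_nil]
  | succ N ih =>
    intro todo done hlen
    match todo with
    | [] => simp [pvNormLoop_nil]
    | t :: rest =>
      rw [List.length_cons, List.range'_succ, List.foldl_cons]
      have hget : (done ++ t :: rest).getD done.length "" = t := by simp [List.getD]
      have hdrop1 : (done ++ t :: rest).drop (done.length + 1) = rest := by
        simpa using List.drop_length_add_append (l₁ := done) (l₂ := t :: rest) 1
      by_cases hB : PySem.Str.pyGet? t 0 = some 'B'
      · -- current tag opens a span
        rcases hsp : pvSplitES rest with ⟨pre, ro⟩
        match ro with
        | none =>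
          -- no closer ahead: tags[i] = 'O'
          have hrest : rest = pre := by
            have he := pvSplitES_eq rest
            rw [hsp] at he
            simpa using he
          have hfind : convertToBio_find (done ++ t :: rest) (done.length + 1) =
              (done ++ t :: rest).length := by
            apply pvFind_of_drop_none _ _ rest hdrop1 (by simp)
            intro x hx
            exact pvSplitES_pre rest x (by rw [hsp]; simpa [hrest] using hx)
          have hstep : convertToBio_step (done ++ t :: rest) done.length =
              done ++ "O" :: rest := by
            unfold convertToBio_step
            rw [hget, if_pos hB, hfind, if_pos (le_refl _)]
            simp
          rw [hstep]
          have := ih rest (done ++ ["O"]) (by simp at hlen; omega)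
          simp only [List.length_append, List.length_cons, List.length_nil] at this ⊢
          simpa [pvNormLoop_cons_none hB hsp] using this
        | some (s, post) =>
          have hrest : rest = pre ++ s :: post := by
            have he := pvSplitES_eq rest
            rw [hsp] at he
            simpa using he
          have hlenr : pre.length + post.length + 1 = rest.length := pvSplitES_len hsp
          have hfind : convertToBio_find (done ++ t :: rest) (done.length + 1) =
              done.length + 1 + pre.length := by
            have hpreES : ∀ x ∈ pre, pvEsB x = false := by
              intro x hx
              exact pvSplitES_pre rest x (by rw [hsp]; simpa using hx)
            exact pvFind_of_drop_some _ _ pre s post (by rw [hdrop1, hrest]) hpreES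
              (pvSplitES_some (by rw [hsp]))
          have hlt : ¬ ((done ++ t :: rest).length ≤ done.length + 1 + pre.length) := by
            simp [hrest]
            omega
          have hgetj : (done ++ t :: rest).getD (done.length + 1 + pre.length) "" = s := by
            have : done ++ t :: rest = (done ++ t :: pre) ++ s :: post := by
              simp [hrest]
            rw [this]
            have hl : (done ++ t :: pre).length = done.length + 1 + pre.length := by
              simp; omega
            rw [← hl]
            simp [List.getD]
          have hdropj : (done ++ t :: rest).drop (done.length + 1 + pre.length) = s :: post := by
            have : done ++ t :: rest = (done ++ t :: pre) ++ s :: post := by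
              simp [hrest]
            rw [this]
            have hl : (done ++ t :: pre).length = done.length + 1 + pre.length := by
              simp; omega
            rw [← hl, List.drop_left]
          have htake : (done ++ t :: rest).take done.length = done := List.take_left
          have hsub : done.length + 1 + pre.length - done.length = pre.length + 1 := by omega
          by_cases hS : PySem.Str.pyGet? s 0 = some 'S'
          · -- closer is an S: error case, wipe tags[i:j] with 'O'
            have hstep : convertToBio_step (done ++ t :: rest) done.length =
                (done ++ ["O"]) ++ (List.replicate pre.length "O" ++ s :: post) := by
              unfold convertToBio_step
              rw [hget, if_pos hB, hfind, if_neg hlt, hgetj, if_pos hS, htake, hdropj, hsub]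
              simp [List.replicate_succ]
            rw [hstep]
            have hlen2 : (List.replicate pre.length "O" ++ s :: post).length = rest.length := by
              simp; omega
            have := ih (List.replicate pre.length "O" ++ s :: post) (done ++ ["O"])
              (by simp at hlen ⊢; omega)
            rw [hlen2] at this
            simp only [List.length_append, List.length_cons, List.length_nil] at this ⊢
            rw [this]
            rw [pvNormLoop_replicate pvFc_notB_O pre.length,
              pvNormLoop_cons_notB (pvFc_ne_of_eq hS (by decide)),
              pvNormLoop_cons_S hB hsp hS]
            simp [List.replicate_succ]
          · -- closer is an E: fill tags[i+1:j+1] with 'I-span'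
            have hE : PySem.Str.pyGet? s 0 = some 'E' := by
              have := pvSplitES_some (by rw [hsp] : (pvSplitES rest).2 = some (s, post))
              simp [pvEsB, pvFc] at this
              rcases this with h | h
              · exact h
              · exact absurd h hS
            have htake1 : (done ++ t :: rest).take (done.length + 1) = done ++ [t] := by
              simp [List.take_append]
            have hdropj1 : (done ++ t :: rest).drop (done.length + 1 + pre.length + 1) = post :=
              pvDrop_succ_of_drop hdropj
            have hstep : convertToBio_step (done ++ t :: rest) done.length =
                (done ++ [t]) ++ (List.replicate (pre.length + 1) "I-span" ++ post) := by
              unfold convertToBio_step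
              rw [hget, if_pos hB, hfind, if_neg hlt, hgetj, if_neg hS, if_pos hE, htake1,
                hdropj1, hsub]
              simp
            rw [hstep]
            have hlen2 : (List.replicate (pre.length + 1) "I-span" ++ post).length = rest.length := by
              simp; omega
            have := ih (List.replicate (pre.length + 1) "I-span" ++ post) (done ++ [t])
              (by simp at hlen ⊢; omega)
            rw [hlen2] at this
            simp only [List.length_append, List.length_cons, List.length_nil] at this ⊢
            rw [this]
            rw [pvNormLoop_replicate pvFc_notB_I (pre.length + 1),
              pvNormLoop_cons_E hB hsp hS]
            simp
      · -- not a 'B': the iteration does nothing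
        have hstep : convertToBio_step (done ++ t :: rest) done.length = done ++ t :: rest := by
          unfold convertToBio_step
          rw [hget, if_neg hB]
        rw [hstep]
        have := ih rest (done ++ [t]) (by simp at hlen; omega)
        simp only [List.length_append, List.length_cons, List.length_nil] at this ⊢
        simpa [pvNormLoop_cons_notB hB] using this

theorem pvA_eq (tags : List String) :
    convert_to_bio tags = (pvNormLoop tags).map pvSmap := by
  unfold convert_to_bio
  have := pvLoopA tags.length tags [] (le_refl _)
  simp only [List.nil_append, List.length_nil] at this
  rw [List.range_eq_range', this]
  rfl

-- B-side helpers
theorem pvNxt_cons (n k : Nat) (t : String) (rest : List String) :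
    convertToBioAlt_nxt n k (t :: rest) =
      (if PySem.Str.pyGet? t 0 = some 'E' ∨ PySem.Str.pyGet? t 0 = some 'S' then k
        else (convertToBioAlt_nxt n (k + 1) rest).headD n) :: convertToBioAlt_nxt n (k + 1) rest :=
  rfl

theorem pvHeadD_eq_getD (l : List Nat) (n : Nat) : l.headD n = l.getD 0 n := by
  cases l <;> simp [List.getD]

theorem pvEsB_true' {s : String} (hs : pvEsB s = true) :
    PySem.Str.pyGet? s 0 = some 'E' ∨ PySem.Str.pyGet? s 0 = some 'S' :=
  pvEsB_true hs

theorem pvEsB_false' {s : String} (hs : pvEsB s = false) :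
    ¬ (PySem.Str.pyGet? s 0 = some 'E' ∨ PySem.Str.pyGet? s 0 = some 'S') :=
  pvEsB_false hs

theorem pvSmap_O : pvSmap "O" = "O" := by decide

theorem pvSmap_I : pvSmap "I-span" = "I-span" := by decide

theorem pvSmap_of_S {t : String} (h : PySem.Str.pyGet? t 0 = some 'S') :
    pvSmap t = String.ofList ('B' :: t.toList.drop 1) := by
  rw [pvSmap, if_pos h]

theorem pvSmap_of_notS {t : String} (h : ¬ PySem.Str.pyGet? t 0 = some 'S') :
    pvSmap t = t := by
  rw [pvSmap, if_neg h]

-- the nxt array holds the absolute index of the next closer (n if none ahead)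
theorem pvNxt_getD_none (n : Nat) :
    ∀ (l : List String) (k : Nat), k + l.length = n → ∀ (m : Nat) (pre : List String),
      m ≤ l.length → pvSplitES (l.drop m) = (pre, none) →
      (convertToBioAlt_nxt n k l).getD m n = n := by
  intro l
  induction l with
  | nil => intro k hk m pre hm hsp; simp [convertToBioAlt_nxt]
  | cons t rest ih =>
    intro k hk m pre hm hsp
    simp only [List.length_cons] at hk hm
    match m with
    | 0 =>
      simp only [List.drop_zero] at hsp
      rw [pvNxt_cons, List.getD_cons_zero]
      by_cases hT : pvEsB t
      · exfalso
        rw [pvSplitES, if_pos hT] at hsp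
        simp at hsp
      · rw [pvSplitES, if_neg (by simpa using hT)] at hsp
        have hsp2 : (pvSplitES rest).2 = none := by
          have := congrArg Prod.snd hsp
          simpa using this
        rw [if_neg (pvEsB_false' (by simpa using hT)), pvHeadD_eq_getD]
        exact ih (k + 1) (by omega) 0 (pvSplitES rest).1 (by simp)
          (by rw [List.drop_zero, ← hsp2])
    | m' + 1 =>
      rw [pvNxt_cons, List.getD_cons_succ]
      exact ih (k + 1) (by omega) m' pre (by omega) (by simpa using hsp)

theorem pvNxt_getD_some (n : Nat) :
    ∀ (l : List String) (k : Nat), k + l.length = n → ∀ (m : Nat) (pre : List String)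
      (s : String) (post : List String),
      m ≤ l.length → pvSplitES (l.drop m) = (pre, some (s, post)) →
      (convertToBioAlt_nxt n k l).getD m n = k + m + pre.length := by
  intro l
  induction l with
  | nil =>
    intro k hk m pre s post hm hsp
    simp [pvSplitES] at hsp
  | cons t rest ih =>
    intro k hk m pre s post hm hsp
    simp only [List.length_cons] at hk hm
    match m with
    | 0 =>
      simp only [List.drop_zero] at hsp
      rw [pvNxt_cons, List.getD_cons_zero]
      by_cases hT : pvEsB t
      · rw [pvSplitES, if_pos hT] at hsp
        have hpre : pre = [] := by
          have := congrArg Prod.fst hsp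
          simpa using this.symm
        rw [if_pos (pvEsB_true' hT), hpre]
        simp
      · rw [pvSplitES, if_neg (by simpa using hT)] at hsp
        have hpre : pre = t :: (pvSplitES rest).1 := by
          have := congrArg Prod.fst hsp
          simpa using this.symm
        have hsp2 : (pvSplitES rest).2 = some (s, post) := by
          have := congrArg Prod.snd hsp
          simpa using this
        rw [if_neg (pvEsB_false' (by simpa using hT)), pvHeadD_eq_getD]
        rw [ih (k + 1) (by omega) 0 (pvSplitES rest).1 s post (by simp) (by rw [List.drop_zero, ← hsp2])]
        rw [hpre]
        simp
        omega
    | m' + 1 =>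
      rw [pvNxt_cons, List.getD_cons_succ]
      rw [ih (k + 1) (by omega) m' pre s post (by omega) (by simpa using hsp)]
      omega

-- the main B-side lemma: the forward pass emits exactly the (already S-mapped) spec output
theorem pvLoopB (tags : List String) :
    ∀ (fuel i : Nat) (out : List String), i ≤ tags.length → tags.length - i ≤ fuel →
      convertToBioAlt_loop tags (convertToBioAlt_nxt tags.length 0 tags) tags.length fuel i out =
        out ++ (pvNormLoop (tags.drop i)).map pvSmap := by
  intro fuel
  induction fuel with
  | zero =>
    intro i out hi hf
    have : i = tags.length := by omega
    subst this
    simp [convertToBioAlt_loop, pvNormLoop_nil]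
  | succ fuel ih =>
    intro i out hi hf
    rw [convertToBioAlt_loop]
    by_cases hin : i < tags.length
    · rw [if_pos hin]
      rcases hh : tags.drop i with _ | ⟨a, as⟩
      · exact absurd (List.drop_eq_nil_iff.mp hh) (by omega)
      have hgi : tags.getD i "" = a := pvGetD_of_drop hh
      have hdi : tags.drop (i + 1) = as := pvDrop_succ_of_drop hh
      by_cases hB : PySem.Str.pyGet? (tags.getD i "") 0 = some 'B'
      · rw [if_pos hB]
        have hBa : PySem.Str.pyGet? a 0 = some 'B' := hgi ▸ hB
        rcases hsp : pvSplitES as with ⟨pre, ro⟩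
        have hsp' : pvSplitES (tags.drop (i + 1)) = (pre, ro) := by rw [hdi, hsp]
        match ro with
        | none =>
          have hj : (convertToBioAlt_nxt tags.length 0 tags).getD (i + 1) tags.length =
              tags.length :=
            pvNxt_getD_none tags.length tags 0 (by simp) (i + 1) pre (by omega) hsp'
          rw [hj, if_pos (le_refl _)]
          rw [ih (i + 1) (out ++ ["O"]) (by omega) (by omega), hdi]
          rw [pvNormLoop_cons_none hBa hsp]
          simp [pvSmap_O]
        | some (s, post) =>
          have hj : (convertToBioAlt_nxt tags.length 0 tags).getD (i + 1) tags.length =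
              i + 1 + pre.length := by
            have := pvNxt_getD_some tags.length tags 0 (by simp) (i + 1) pre s post
              (by omega) hsp'
            omega
          have hrest : tags.drop (i + 1) = pre ++ s :: post := by
            have he := pvSplitES_eq as
            rw [hsp] at he
            rw [hdi]
            simpa using he
          have hlenr : pre.length + post.length + 1 = tags.length - (i + 1) := by
            have h1 := pvSplitES_len hsp
            have h2 : as.length = tags.length - (i + 1) := by
              rw [← hdi]; simp
            omega
          have hjlt : ¬ (tags.length ≤ i + 1 + pre.length) := by omega
          have hdropj : tags.drop (i + 1 + pre.length) = s :: post := by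
            have h3 : tags.drop (i + 1 + pre.length) = (tags.drop (i + 1)).drop pre.length := by
              rw [List.drop_drop]
            rw [h3, hrest, List.drop_left]
          have hgetj : tags.getD (i + 1 + pre.length) "" = s := pvGetD_of_drop hdropj
          rw [hj, if_neg hjlt, hgetj]
          have hsub : i + 1 + pre.length - i = pre.length + 1 := by omega
          by_cases hS : PySem.Str.pyGet? s 0 = some 'S'
          · rw [if_pos hS, hsub]
            rw [ih (i + 1 + pre.length) _ (by omega) (by omega)]
            rw [hdropj, pvNormLoop_cons_notB (pvFc_ne_of_eq hS (by decide))]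
            rw [pvNormLoop_cons_S hBa hsp hS]
            simp [List.map_replicate, pvSmap_O]
          · rw [if_neg hS, hsub]
            have hdropj1 : tags.drop (i + 1 + pre.length + 1) = post :=
              pvDrop_succ_of_drop hdropj
            rw [ih (i + 1 + pre.length + 1) _ (by omega) (by omega), hdropj1]
            rw [pvNormLoop_cons_E hBa hsp hS]
            have hsa : pvSmap a = a := pvSmap_of_notS (by rw [hBa]; simp)
            rw [hgi]
            simp [List.map_replicate, pvSmap_I, hsa]
      · rw [if_neg hB]
        have hBa : ¬ PySem.Str.pyGet? a 0 = some 'B' := hgi ▸ hB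
        by_cases hS : PySem.Str.pyGet? (tags.getD i "") 0 = some 'S'
        · rw [if_pos hS]
          rw [ih (i + 1) _ (by omega) (by omega), hdi]
          rw [pvNormLoop_cons_notB hBa, hgi]
          simp [pvSmap_of_S (hgi ▸ hS), hgi]
        · rw [if_neg hS]
          rw [ih (i + 1) _ (by omega) (by omega), hdi]
          rw [pvNormLoop_cons_notB hBa]
          simp [pvSmap_of_notS (hgi ▸ hS)]
          exact hgi
    · rw [if_neg hin]
      have : i = tags.length := by omega
      subst this
      simp [pvNormLoop_nil]

theorem pvB_eq (tags : List String) :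
    convert_to_bio_alt tags = (pvNormLoop tags).map pvSmap := by
  unfold convert_to_bio_alt
  simpa using pvLoopB tags tags.length 0 [] (by omega) (by omega)

-- ===== VERDICT (by name: the statement is the Claim_ definition above) =====
theorem convert_to_bio_spec : Claim_equal_convert_to_bio := by
  intro tags _ _
  unfold Spec_convert_to_bio
  rw [pvA_eq, pvB_eq]
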